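-- pv_equiv track=rewrite | github.com/quartictech/dilectic | scripts/import_accounts.py | find_where
-- ===== SOURCE A (Python) =====
-- def find_where(l, prefix):
--   result = []
--   found_idx = None
--   for idx, val in enumerate(l):
--     if val.startswith(prefix):
--       result.append(val[len(prefix):].strip().rstrip())
--       found_idx = idx + 1
--       break
--   while found_idx and found_idx < len(l) and l[found_idx]:
--     result.append(l[found_idx].strip().rstrip())
--     found_idx += 1
--   return result
-- ===== SOURCE B (Python) =====
-- def find_where(l, prefix):
--     hits = [(i, v) for i, v in enumerate(l) if v.startswith(prefix)]
--     if not hits: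
--         return []
--     i, v = hits[0]
--     tail = l[i + 1:]
--     if '' in tail:
--         tail = tail[:tail.index('')]
--     return [s.strip() for s in [v[len(prefix):]] + tail]
-- ===== Notes on version B (the rewrite author's own statement) =====
-- stated objective: alternative
-- what changed: Replaced A's single indexed scan with found_idx/break/while bookkeeping by staged whole-list passes: filter all prefix hits via enumerate, slice the tail after the first hit, cut it at the first empty line with list.index, and map one .strip() over the block.
import Mathlib
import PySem

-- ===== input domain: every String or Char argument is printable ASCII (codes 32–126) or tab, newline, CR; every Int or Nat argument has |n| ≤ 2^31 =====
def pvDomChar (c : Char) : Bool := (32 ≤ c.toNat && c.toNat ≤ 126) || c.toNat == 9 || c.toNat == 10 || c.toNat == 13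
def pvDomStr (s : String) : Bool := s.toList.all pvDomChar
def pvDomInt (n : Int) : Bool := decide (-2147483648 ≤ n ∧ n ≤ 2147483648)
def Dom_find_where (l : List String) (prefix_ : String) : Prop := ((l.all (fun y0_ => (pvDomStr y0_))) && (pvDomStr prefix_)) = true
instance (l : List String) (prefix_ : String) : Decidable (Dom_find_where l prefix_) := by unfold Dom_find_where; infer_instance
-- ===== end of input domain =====

-- B replaces A's single scan with found_idx/break/while bookkeeping by staged whole-list
-- passes: filter all prefix hits, slice off the tail after the first hit, cut it at the
-- first empty line via index, and map one .strip() over the block; objective: alternative.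

-- ===== PORT A =====
-- the 'while found_idx and found_idx < len(l) and l[found_idx]:' loop
def pvA_while (l : List String) (res : List String) (idx : Nat) : List String :=
  if h : idx ≠ 0 ∧ idx < l.length ∧ l.getD idx "" ≠ "" then
    pvA_while l (res ++ [PySem.Str.rstrip (PySem.Str.strip (l.getD idx ""))]) (idx + 1)
  else res
termination_by l.length - idx
decreasing_by omega

-- the 'for idx, val in enumerate(l): … break' loop: returns (result, found_idx)
def pvA_scan (prefix_ : String) : List String → Nat → List String × Option Nat
  | [], _ => ([], none)
  | v :: rest, idx =>
    if PySem.Str.startswith v prefix_ then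
      ([PySem.Str.rstrip (PySem.Str.strip (PySem.Str.slice v (some (PySem.Str.len prefix_)) none))],
       some (idx + 1))
    else pvA_scan prefix_ rest (idx + 1)

def find_where (l : List String) (prefix_ : String) : List String :=
  match pvA_scan prefix_ l 0 with
  | (result, none) => result
  | (result, some found_idx) => pvA_while l result found_idx

-- ===== PORT B =====
-- hits = [(i, v) for i, v in enumerate(l) if v.startswith(prefix)]; then slice / index / map strip
def find_where_alt (l : List String) (prefix_ : String) : List String :=
  let hits := (PySem.List.enumerate l 0).filter (fun p => PySem.Str.startswith p.2 prefix_)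
  match hits with
  | [] => []
  | (i, v) :: _ =>
    let tail0 := PySem.List.slice l (some (i + 1)) none
    let tail := if "" ∈ tail0 then
        PySem.List.slice tail0 none (some (((PySem.List.index? tail0 "").getD 0 : Nat) : Int))
      else tail0
    (PySem.Str.slice v (some (PySem.Str.len prefix_)) none :: tail).map PySem.Str.strip

-- ===== PRECONDITION & SPEC =====
def Spec_find_where (l : List String) (prefix_ : String) (out : List String) : Prop := out = find_where_alt l prefix_
instance (l : List String) (prefix_ : String) (out : List String) : Decidable (Spec_find_where l prefix_ out) := by unfold Spec_find_where; infer_instance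

-- ===== CLAIM =====
def Claim_equal_find_where : Prop := ∀ (l : List String) (prefix_ : String), Dom_find_where l prefix_ → Spec_find_where l prefix_ (find_where l prefix_)

-- ===== LEMMAS AND PROOFS =====
-- canonical cons-structured middle form: both ports are proved equal to it
def pvTake : List String → List String
  | [] => []
  | w :: rest => if w = "" then [] else PySem.Str.strip w :: pvTake rest

def pvCanon : List String → String → List String
  | [], _ => []
  | v :: rest, prefix_ =>
    if PySem.Str.startswith v prefix_ then
      PySem.Str.strip (PySem.Str.slice v (some (PySem.Str.len prefix_)) none) :: pvTake rest
    else pvCanon rest prefix_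

theorem dropWhile_idem {α : Type} (p : α → Bool) (xs : List α) :
    List.dropWhile p (List.dropWhile p xs) = List.dropWhile p xs := by
  induction xs with
  | nil => rfl
  | cons a t ih =>
    by_cases h : p a = true
    · simpa [h] using ih
    · simp [h]

theorem rstrip_strip (s : String) : PySem.Str.rstrip (PySem.Str.strip s) = PySem.Str.strip s := by
  have h : (PySem.Str.rstrip (PySem.Str.strip s)).toList = (PySem.Str.strip s).toList := by
    simp [PySem.Str.toList_rstrip, PySem.Str.toList_strip, PySem.Chars.strip, PySem.Chars.rstrip,
      dropWhile_idem]
  exact String.toList_inj.mp h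

theorem drop_facts (l : List String) (idx : Nat) (v : String) (rest : List String)
    (h : l.drop idx = v :: rest) :
    idx < l.length ∧ l[idx]? = some v ∧ l.drop (idx + 1) = rest := by
  have hlen : idx < l.length := by
    have := congrArg List.length h
    simp [List.length_drop] at this
    omega
  have hget : l[idx]? = some v := by
    have h0 : (l.drop idx)[0]? = some v := by simp [h]
    rw [List.getElem?_drop] at h0
    simpa using h0
  refine ⟨hlen, hget, ?_⟩
  have : l.drop (idx + 1) = (l.drop idx).drop 1 := by
    rw [List.drop_drop]
  simp [this, h]

theorem while_eq_take (suf : List String) : ∀ (l res : List String) (idx : Nat),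
    idx ≠ 0 → l.drop idx = suf → pvA_while l res idx = res ++ pvTake suf := by
  induction suf with
  | nil =>
    intro l res idx hne hdrop
    have : l.length ≤ idx := by
      by_contra hlt
      have := List.drop_eq_nil_iff.mp hdrop
      omega
    rw [pvA_while]
    simp [pvTake]
    omega
  | cons v rest ih =>
    intro l res idx hne hdrop
    obtain ⟨hlen, hget, hdrop'⟩ := drop_facts l idx v rest hdrop
    by_cases hv : v = ""
    · rw [pvA_while]
      rw [dif_neg (by simp [List.getD, hget, hv])]
      simp [pvTake, hv]
    · rw [pvA_while]
      rw [dif_pos ⟨hne, hlen, by simp [List.getD, hget, hv]⟩]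
      rw [ih l _ (idx + 1) (by omega) hdrop']
      simp [pvTake, hv, List.getD, hget, rstrip_strip]

theorem scan_eq_canon (suf : List String) : ∀ (l : List String) (prefix_ : String) (idx : Nat),
    l.drop idx = suf →
    (match pvA_scan prefix_ suf idx with
     | (result, none) => result
     | (result, some found_idx) => pvA_while l result found_idx) = pvCanon suf prefix_ := by
  induction suf with
  | nil => intro l p idx _; simp [pvA_scan, pvCanon]
  | cons v rest ih =>
    intro l p idx hdrop
    obtain ⟨_, _, hdrop'⟩ := drop_facts l idx v rest hdrop
    by_cases hsw : PySem.Str.startswith v p = true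
    · simp only [pvA_scan]
      rw [if_pos hsw]
      dsimp only
      rw [while_eq_take rest l _ (idx + 1) (by omega) hdrop']
      simp only [pvCanon]
      rw [if_pos hsw]
      simp [rstrip_strip]
    · simp only [pvA_scan]
      rw [if_neg hsw]
      rw [ih l p (idx + 1) hdrop']
      simp only [pvCanon]
      rw [if_neg hsw]

-- B's slice-at-first-empty block, stripped, is pvTake
theorem cut_eq_take (tail : List String) :
    ((if "" ∈ tail then
        PySem.List.slice tail none (some (((PySem.List.index? tail "").getD 0 : Nat) : Int))
      else tail).map PySem.Str.strip) = pvTake tail := by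
  induction tail with
  | nil => simp [pvTake]
  | cons w rest ih =>
    by_cases hw : w = ""
    · subst hw
      rw [if_pos (by simp)]
      rw [PySem.List.index?_cons_self]
      simp [PySem.List.slice_to, pvTake]
    · by_cases hm : "" ∈ rest
      · rw [if_pos (by simp [hm])]
        obtain ⟨k, hk⟩ :=
          Option.isSome_iff_exists.mp ((PySem.List.index?_isSome_iff rest "").mpr hm)
        rw [PySem.List.index?_cons_of_ne rest hw, hk]
        rw [if_pos hm, hk] at ih
        simp only [Option.map_some, Option.getD_some] at ih ⊢
        rw [PySem.List.slice_to_natCast] at ih ⊢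
        simp only [List.take_succ_cons, List.map_cons]
        rw [ih]
        simp [pvTake, hw]
      · rw [if_neg (by simp [hw, hm])]
        rw [if_neg hm] at ih
        simp [pvTake, hw, ih]

theorem alt_eq_canon_aux (suf : List String) : ∀ (l : List String) (prefix_ : String) (n : Nat),
    l.drop n = suf →
    (match (PySem.List.enumerate suf (n : Int)).filter (fun p => PySem.Str.startswith p.2 prefix_) with
     | [] => ([] : List String)
     | (i, v) :: _ =>
       (PySem.Str.slice v (some (PySem.Str.len prefix_)) none ::
         (if "" ∈ PySem.List.slice l (some (i + 1)) none then
            PySem.List.slice (PySem.List.slice l (some (i + 1)) none) none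
              (some (((PySem.List.index? (PySem.List.slice l (some (i + 1)) none) "").getD 0 : Nat) : Int))
          else PySem.List.slice l (some (i + 1)) none)).map PySem.Str.strip)
      = pvCanon suf prefix_ := by
  induction suf with
  | nil => intro l p n _; simp [PySem.List.enumerate_nil, pvCanon]
  | cons v rest ih =>
    intro l p n hdrop
    obtain ⟨_, _, hdrop'⟩ := drop_facts l n v rest hdrop
    rw [PySem.List.enumerate_cons]
    by_cases hsw : PySem.Str.startswith v p = true
    · rw [List.filter_cons_of_pos (by simpa using hsw)]
      dsimp only
      have hslice : PySem.List.slice l (some ((n : Int) + 1)) none = rest := by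
        have : ((n : Int) + 1) = ((n + 1 : Nat) : Int) := by push_cast; ring
        rw [this, PySem.List.slice_from_natCast, hdrop']
      rw [hslice]
      simp only [pvCanon]
      rw [if_pos hsw]
      have := cut_eq_take rest
      simp only [List.map_cons] at *
      rw [this]
    · rw [List.filter_cons_of_neg (by simpa using hsw)]
      have hcast : ((n : Int) + 1) = ((n + 1 : Nat) : Int) := by push_cast; ring
      rw [hcast, ih l p (n + 1) hdrop']
      simp only [pvCanon]
      rw [if_neg hsw]

-- ===== VERDICT =====
theorem find_where_spec : Claim_equal_find_where := by
  intro l prefix_ _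
  unfold Spec_find_where find_where find_where_alt
  rw [scan_eq_canon l l prefix_ 0 (by simp)]
  have h := alt_eq_canon_aux l l prefix_ 0 (by simp)
  simpa using h.symm
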